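-- pv_equiv track=rewrite | github.com/brentonk/us_diplomatic_missions | transition_extraction/diagnose.py | _compute_disagreements
-- ===== SOURCE A (Python) =====
-- _PRESENT = (9999, 12, 31)
--
-- DateTuple = tuple[int, int, int]
--
-- Range = tuple[DateTuple, DateTuple | None]
--
-- def _compute_disagreements(
--     csv_ranges: list[Range],
--     asm_ranges: list[Range],
-- ) -> tuple[list[Range], list[Range]]:
--     """Find intervals where the two range sets disagree.
--
--     Returns (old_only, new_only):
--       old_only: original says relations, assembled does not
--       new_only: assembled says relations, original does not
--     """
--     def to_edges(ranges: list[Range]) -> list[tuple[DateTuple, bool]]: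
--         edges: list[tuple[DateTuple, bool]] = []
--         for start, end in ranges:
--             edges.append((start, True))
--             edges.append((end or _PRESENT, False))
--         return edges
--
--     csv_edges = dict(to_edges(csv_ranges))
--     asm_edges = dict(to_edges(asm_ranges))
--
--     all_dates = sorted(set(csv_edges) | set(asm_edges))
--
--     csv_above = False
--     asm_above = False
--     old_only: list[Range] = []
--     new_only: list[Range] = []
--     disagree_type: str | None = None
--     disagree_start: DateTuple = (0, 0, 0)
--
--     for date in all_dates:
--         if date in csv_edges:
--             csv_above = csv_edges[date]
--         if date in asm_edges:
--             asm_above = asm_edges[date]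
--
--         if csv_above and not asm_above:
--             current = "old"
--         elif asm_above and not csv_above:
--             current = "new"
--         else:
--             current = None
--
--         if current != disagree_type:
--             end = None if date == _PRESENT else date
--             if disagree_type == "old":
--                 old_only.append((disagree_start, end))
--             elif disagree_type == "new":
--                 new_only.append((disagree_start, end))
--             disagree_type = current
--             disagree_start = date
--
--     if disagree_type == "old":
--         old_only.append((disagree_start, None))
--     elif disagree_type == "new":
--         new_only.append((disagree_start, None))
--
--     return old_only, new_only
-- ===== SOURCE B (Python) =====
-- _PRESENT = (9999, 12, 31)
--
--
-- def _compute_disagreements(csv_ranges, asm_ranges):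
--     """Two-phase rewrite: label every boundary date, then coalesce runs of
--     equal labels into ranges."""
--     def to_edges(ranges):
--         edges = {}
--         for start, end in ranges:
--             edges[start] = True
--             edges[end or _PRESENT] = False
--         return edges
--
--     csv_edges = to_edges(csv_ranges)
--     asm_edges = to_edges(asm_ranges)
--     all_dates = sorted(set(csv_edges) | set(asm_edges))
--
--     # Phase 1: one label per date ("old" / "new" / None).
--     labels = []
--     c = a = False
--     for d in all_dates:
--         c = csv_edges.get(d, c)
--         a = asm_edges.get(d, a)
--         labels.append((d, "old" if c and not a else "new" if a and not c else None))
--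
--     # Phase 2: coalesce maximal runs of an equal label into (start, end) ranges.
--     old_only = []
--     new_only = []
--     i, n = 0, len(labels)
--     while i < n:
--         d, lab = labels[i]
--         j = i + 1
--         while j < n and labels[j][1] == lab:
--             j += 1
--         if lab is not None:
--             if j < n:
--                 nd = labels[j][0]
--                 end = None if nd == _PRESENT else nd
--             else:
--                 end = None
--             (old_only if lab == "old" else new_only).append((d, end))
--         i = j
--     return old_only, new_only
-- ===== Notes on version B (the rewrite author's own statement) =====
-- stated objective: simpler
-- what changed: A's single stateful sweep (carrying disagree_type/disagree_start and emitting on label change, plus a post-loop flush) is split into two plain phases: label every boundary date old/new/None in one pass, then coalesce maximal runs of equal labels into ranges, each run's end being the next run's start date.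
import Mathlib
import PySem

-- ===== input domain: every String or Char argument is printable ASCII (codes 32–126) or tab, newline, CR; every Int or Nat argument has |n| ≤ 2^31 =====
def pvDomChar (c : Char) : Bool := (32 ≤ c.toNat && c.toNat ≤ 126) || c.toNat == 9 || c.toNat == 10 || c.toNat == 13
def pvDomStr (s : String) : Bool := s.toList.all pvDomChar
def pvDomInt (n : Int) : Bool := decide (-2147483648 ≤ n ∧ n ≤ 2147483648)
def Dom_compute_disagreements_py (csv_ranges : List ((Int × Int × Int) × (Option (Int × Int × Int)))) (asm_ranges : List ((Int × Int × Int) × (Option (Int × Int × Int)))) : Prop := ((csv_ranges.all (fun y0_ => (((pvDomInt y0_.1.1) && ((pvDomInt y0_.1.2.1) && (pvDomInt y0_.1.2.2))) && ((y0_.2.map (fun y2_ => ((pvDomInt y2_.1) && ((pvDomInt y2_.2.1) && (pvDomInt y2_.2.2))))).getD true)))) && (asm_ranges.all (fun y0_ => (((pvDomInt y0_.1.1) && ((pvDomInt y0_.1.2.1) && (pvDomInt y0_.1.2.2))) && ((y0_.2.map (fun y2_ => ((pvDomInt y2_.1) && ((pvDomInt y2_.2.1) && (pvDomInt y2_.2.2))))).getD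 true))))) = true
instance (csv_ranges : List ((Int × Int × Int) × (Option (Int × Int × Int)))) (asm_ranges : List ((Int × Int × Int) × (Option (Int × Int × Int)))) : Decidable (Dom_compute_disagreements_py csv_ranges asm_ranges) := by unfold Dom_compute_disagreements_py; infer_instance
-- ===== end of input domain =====

-- B is a simpler two-phase decomposition (label every date, then coalesce runs);
-- equal return value to A on the whole domain, no speed claim.

-- _PRESENT = (9999, 12, 31)
def pvPresent : Int × Int × Int := (9999, 12, 31)

-- sort key realising Python's lexicographic tuple order; exact for the
-- |component| ≤ 2^31 integers of Dom (base 2^33 separates the components there)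
def pvDateKey (d : Int × Int × Int) : Int :=
  (d.1 * 8589934592 + d.2.1) * 8589934592 + d.2.2

-- ===== PORT A =====
-- to_edges: the list of (date, bool) edge pairs, in A's append order
def pvToEdgesA (ranges : List ((Int × Int × Int) × (Option (Int × Int × Int)))) :
    List ((Int × Int × Int) × Bool) :=
  ranges.foldl (fun edges r => edges ++ [(r.1, true), (r.2.getD pvPresent, false)]) []

-- the body of A's 'for date in all_dates' loop; state = (csv_above, asm_above,
-- old_only, new_only, disagree_type, disagree_start)
def pvStepA (csv_edges asm_edges : PySem.Dict (Int × Int × Int) Bool)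
    (st : Bool × Bool × List ((Int × Int × Int) × Option (Int × Int × Int)) ×
          List ((Int × Int × Int) × Option (Int × Int × Int)) × Option String × (Int × Int × Int))
    (date : Int × Int × Int) :
    Bool × Bool × List ((Int × Int × Int) × Option (Int × Int × Int)) ×
      List ((Int × Int × Int) × Option (Int × Int × Int)) × Option String × (Int × Int × Int) :=
  let ⟨csv_above₀, asm_above₀, old_only, new_only, disagree_type, disagree_start⟩ := st
  let csv_above := (csv_edges.get? date).getD csv_above₀
  let asm_above := (asm_edges.get? date).getD asm_above₀
  let current : Option String :=
    if csv_above && !asm_above then some "old"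
    else if asm_above && !csv_above then some "new"
    else none
  if current ≠ disagree_type then
    let e := if date = pvPresent then none else some date
    let old_only' := if disagree_type = some "old" then old_only ++ [(disagree_start, e)] else old_only
    let new_only' := if disagree_type = some "new" then new_only ++ [(disagree_start, e)] else new_only
    (csv_above, asm_above, old_only', new_only', current, date)
  else
    (csv_above, asm_above, old_only, new_only, disagree_type, disagree_start)

def compute_disagreements_py (csv_ranges : List ((Int × Int × Int) × (Option (Int × Int × Int)))) (asm_ranges : List ((Int × Int × Int) × (Option (Int × Int × Int)))) : (List ((Int × Int × Int) × (Option (Int × Int × Int)))) × (List ((Int × Int × Int) × (Option (Int × Int × Int)))) :=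
  let csv_edges := PySem.Dict.ofList (pvToEdgesA csv_ranges)
  let asm_edges := PySem.Dict.ofList (pvToEdgesA asm_ranges)
  let all_dates := PySem.List.sorted
    (PySem.Set.update (PySem.Set.ofList csv_edges.keys) asm_edges.keys) pvDateKey false
  let fin := all_dates.foldl (pvStepA csv_edges asm_edges)
    (false, false, [], [], none, ((0 : Int), (0 : Int), (0 : Int)))
  let old_only := if fin.2.2.2.2.1 = some "old" then fin.2.2.1 ++ [(fin.2.2.2.2.2, none)] else fin.2.2.1
  let new_only := if fin.2.2.2.2.1 = some "new" then fin.2.2.2.1 ++ [(fin.2.2.2.2.2, none)] else fin.2.2.2.1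
  (old_only, new_only)

-- ===== PORT B =====
-- B's to_edges builds the dict directly by assignment
def pvToEdgesB (ranges : List ((Int × Int × Int) × (Option (Int × Int × Int)))) :
    PySem.Dict (Int × Int × Int) Bool :=
  ranges.foldl (fun d r => (d.insert r.1 true).insert (r.2.getD pvPresent) false) PySem.Dict.empty

-- Phase 1: label each date ("old" / "new" / none), threading the two flags
def pvLabels (csv_edges asm_edges : PySem.Dict (Int × Int × Int) Bool) :
    List (Int × Int × Int) → Bool → Bool → List ((Int × Int × Int) × Option String)
  | [], _, _ => []
  | d :: rest, c, a =>
    let c' := (csv_edges.get? d).getD c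
    let a' := (asm_edges.get? d).getD a
    (d, if c' && !a' then some "old" else if a' && !c' then some "new" else none)
      :: pvLabels csv_edges asm_edges rest c' a'

-- Phase 2: coalesce maximal runs of an equal label into (start, end) ranges
def pvCoalesce : List ((Int × Int × Int) × Option String) →
    (List ((Int × Int × Int) × Option (Int × Int × Int))) ×
    (List ((Int × Int × Int) × Option (Int × Int × Int)))
  | [] => ([], [])
  | (d, lab) :: rest =>
    let rest' := rest.dropWhile (fun p => p.2 == lab)
    let res := pvCoalesce rest'
    match lab with
    | none => res
    | some t =>
      let e := match rest' with
        | [] => none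
        | (nd, _) :: _ => if nd = pvPresent then none else some nd
      if t = "old" then ((d, e) :: res.1, res.2) else (res.1, (d, e) :: res.2)
  termination_by ls => ls.length
  decreasing_by
    simpa using Nat.lt_succ_of_le (List.length_dropWhile_le _ _)

def compute_disagreements_py_alt (csv_ranges : List ((Int × Int × Int) × (Option (Int × Int × Int)))) (asm_ranges : List ((Int × Int × Int) × (Option (Int × Int × Int)))) : (List ((Int × Int × Int) × (Option (Int × Int × Int)))) × (List ((Int × Int × Int) × (Option (Int × Int × Int)))) :=
  let csv_edges := pvToEdgesB csv_ranges
  let asm_edges := pvToEdgesB asm_ranges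
  let all_dates := PySem.List.sorted
    (PySem.Set.update (PySem.Set.ofList csv_edges.keys) asm_edges.keys) pvDateKey false
  pvCoalesce (pvLabels csv_edges asm_edges all_dates false false)

-- ===== PRECONDITION & SPEC =====
def Spec_compute_disagreements_py (csv_ranges : List ((Int × Int × Int) × (Option (Int × Int × Int)))) (asm_ranges : List ((Int × Int × Int) × (Option (Int × Int × Int)))) (out : (List ((Int × Int × Int) × (Option (Int × Int × Int)))) × (List ((Int × Int × Int) × (Option (Int × Int × Int))))) : Prop := out = compute_disagreements_py_alt csv_ranges asm_ranges
instance (csv_ranges : List ((Int × Int × Int) × (Option (Int × Int × Int)))) (asm_ranges : List ((Int × Int × Int) × (Option (Int × Int × Int)))) (out : (List ((Int × Int × Int) × (Option (Int × Int × Int)))) × (List ((Int × Int × Int) × (Option (Int × Int × Int))))) : Decidable (Spec_compute_disagreements_py csv_ranges asm_ranges out) := by unfold Spec_compute_disagreements_py; exact instDecidableEqProd _ _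

-- ===== CLAIM (what is proved, stated in full; the proofs are below) =====
def Claim_equal_compute_disagreements_py : Prop := ∀ (csv_ranges : List ((Int × Int × Int) × (Option (Int × Int × Int)))) (asm_ranges : List ((Int × Int × Int) × (Option (Int × Int × Int)))), Dom_compute_disagreements_py csv_ranges asm_ranges → Spec_compute_disagreements_py csv_ranges asm_ranges (compute_disagreements_py csv_ranges asm_ranges)

-- ===== LEMMAS AND PROOFS =====

-- PySem.Dict.ofList is the insert-fold
theorem ofList_eq_foldl {κ ν : Type} [BEq κ] (l : List (κ × ν)) :
    PySem.Dict.ofList l = l.foldl (fun d p => d.insert p.1 p.2) PySem.Dict.empty := rfl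

-- both to_edges forms build the same dict
theorem edges_eq_aux (ranges : List ((Int × Int × Int) × (Option (Int × Int × Int))))
    (acc : List ((Int × Int × Int) × Bool)) :
    PySem.Dict.ofList (ranges.foldl
        (fun edges r => edges ++ [(r.1, true), (r.2.getD pvPresent, false)]) acc)
      = ranges.foldl (fun d r => (d.insert r.1 true).insert (r.2.getD pvPresent) false)
          (PySem.Dict.ofList acc) := by
  induction ranges generalizing acc with
  | nil => rfl
  | cons r rest ih =>
      simp only [List.foldl_cons]
      rw [ih]
      congr 1
      rw [ofList_eq_foldl, ofList_eq_foldl, List.foldl_append]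
      rfl

theorem edges_eq (ranges : List ((Int × Int × Int) × (Option (Int × Int × Int)))) :
    PySem.Dict.ofList (pvToEdgesA ranges) = pvToEdgesB ranges := by
  exact edges_eq_aux ranges []

-- "pending run" view of A's loop state (disagree_type, disagree_start)
def pvPend (dt : Option String) (ds : Int × Int × Int)
    (ls : List ((Int × Int × Int) × Option String)) :
    (List ((Int × Int × Int) × Option (Int × Int × Int))) ×
    (List ((Int × Int × Int) × Option (Int × Int × Int))) :=
  match dt with
  | none => pvCoalesce ls
  | some t =>
    let rest := ls.dropWhile (fun p => p.2 == some t)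
    let e := match rest with
      | [] => none
      | (nd, _) :: _ => if nd = pvPresent then none else some nd
    let res := pvCoalesce rest
    if t = "old" then ((ds, e) :: res.1, res.2) else (res.1, (ds, e) :: res.2)

theorem coalesce_cons_none (d : Int × Int × Int)
    (ls : List ((Int × Int × Int) × Option String)) :
    pvCoalesce ((d, none) :: ls) = pvCoalesce ls := by
  match ls with
  | [] => simp [pvCoalesce]
  | (d2, none) :: l2 => simp [pvCoalesce, List.dropWhile]
  | (d2, some t2) :: l2 => simp [pvCoalesce, List.dropWhile]

theorem coalesce_cons (d : Int × Int × Int) (lab : Option String)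
    (ls : List ((Int × Int × Int) × Option String)) :
    pvCoalesce ((d, lab) :: ls) = pvPend lab d ls := by
  cases lab with
  | none => exact coalesce_cons_none d ls
  | some t => simp [pvCoalesce, pvPend]

theorem pend_cons_same (t : String) (ds d : Int × Int × Int)
    (ls : List ((Int × Int × Int) × Option String)) :
    pvPend (some t) ds ((d, some t) :: ls) = pvPend (some t) ds ls := by
  simp [pvPend, List.dropWhile]

-- the post-loop emission of A
def pvFinish (st : Bool × Bool × List ((Int × Int × Int) × Option (Int × Int × Int)) ×
      List ((Int × Int × Int) × Option (Int × Int × Int)) × Option String × (Int × Int × Int)) :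
    (List ((Int × Int × Int) × Option (Int × Int × Int))) ×
    (List ((Int × Int × Int) × Option (Int × Int × Int))) :=
  ((if st.2.2.2.2.1 = some "old" then st.2.2.1 ++ [(st.2.2.2.2.2, none)] else st.2.2.1),
   (if st.2.2.2.2.1 = some "new" then st.2.2.2.1 ++ [(st.2.2.2.2.2, none)] else st.2.2.2.1))

theorem sne1 : ¬ (("old" : String) = "new") := by decide
theorem sne2 : ¬ (("new" : String) = "old") := by decide
theorem ob1 : ((some "old" : Option String) == some "new") = false := by decide
theorem ob2 : ((some "new" : Option String) == some "old") = false := by decide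
theorem on1 : ((none : Option String) == some "old") = false := by decide
theorem on2 : ((none : Option String) == some "new") = false := by decide

theorem main_loop (csv_edges asm_edges : PySem.Dict (Int × Int × Int) Bool)
    (dates : List (Int × Int × Int)) :
    ∀ (c a : Bool) (old new : List ((Int × Int × Int) × Option (Int × Int × Int)))
      (dt : Option String) (ds : Int × Int × Int),
      dt = none ∨ dt = some "old" ∨ dt = some "new" →
      pvFinish (dates.foldl (pvStepA csv_edges asm_edges) (c, a, old, new, dt, ds))
      = (old ++ (pvPend dt ds (pvLabels csv_edges asm_edges dates c a)).1,
         new ++ (pvPend dt ds (pvLabels csv_edges asm_edges dates c a)).2) := by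
  induction dates with
  | nil =>
      rintro c a old new dt ds (rfl | rfl | rfl) <;>
        simp [pvFinish, pvLabels, pvPend, pvCoalesce]
  | cons d rest ih =>
      rintro c a old new dt ds hdt
      simp only [List.foldl_cons, pvStepA, pvLabels]
      cases hcb : (csv_edges.get? d).getD c <;> cases hab : (asm_edges.get? d).getD a <;>
        rcases hdt with rfl | rfl | rfl <;>
          simp only [Bool.not_true, Bool.not_false, Bool.true_and, Bool.false_and,
            Bool.and_self, Bool.and_true, Bool.and_false, if_true, if_false,
            reduceCtorEq, ne_eq, not_true_eq_false, not_false_eq_true,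
            Option.some.injEq, ite_true, ite_false, sne1, sne2, ob1, ob2, on1, on2] <;>
        first
          | (rw [ih _ _ _ _ _ ds (Or.inl rfl)];
             simp [pvPend, coalesce_cons, pend_cons_same, List.dropWhile,
               sne1, sne2, ob1, ob2, on1, on2, List.append_assoc])
          | (rw [ih _ _ _ _ _ d (Or.inl rfl)];
             simp [pvPend, coalesce_cons, pend_cons_same, List.dropWhile,
               sne1, sne2, ob1, ob2, on1, on2, List.append_assoc])
          | (rw [ih _ _ _ _ _ d (Or.inr (Or.inl rfl))];
             simp [pvPend, coalesce_cons, pend_cons_same, List.dropWhile,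
               sne1, sne2, ob1, ob2, on1, on2, List.append_assoc])
          | (rw [ih _ _ _ _ _ d (Or.inr (Or.inr rfl))];
             simp [pvPend, coalesce_cons, pend_cons_same, List.dropWhile,
               sne1, sne2, ob1, ob2, on1, on2, List.append_assoc])
          | (rw [ih _ _ _ _ _ ds (Or.inr (Or.inl rfl))];
             simp [pvPend, coalesce_cons, pend_cons_same, List.dropWhile,
               sne1, sne2, ob1, ob2, on1, on2, List.append_assoc])
          | (rw [ih _ _ _ _ _ ds (Or.inr (Or.inr rfl))];
             simp [pvPend, coalesce_cons, pend_cons_same, List.dropWhile,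
               sne1, sne2, ob1, ob2, on1, on2, List.append_assoc])

-- ===== VERDICT (by name: the statement is the Claim_ definition above) =====
theorem compute_disagreements_py_spec : Claim_equal_compute_disagreements_py := by
  intro csv asm _
  unfold Spec_compute_disagreements_py compute_disagreements_py compute_disagreements_py_alt
  rw [edges_eq csv, edges_eq asm]
  have h := main_loop (pvToEdgesB csv) (pvToEdgesB asm)
    (PySem.List.sorted (PySem.Set.update (PySem.Set.ofList (pvToEdgesB csv).keys)
      (pvToEdgesB asm).keys) pvDateKey false)
    false false [] [] none ((0 : Int), (0 : Int), (0 : Int)) (Or.inl rfl)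
  simpa [pvPend, pvFinish] using h
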